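-- pv_equiv track=rewrite | github.com/TiagoCoelhoFCUP/Bioinformatics | run.py | finds_parterns_frequency
-- ===== SOURCE A (Python) =====
-- def finds_parterns_frequency(seqA, seqB, low, high):
--
--     sqm1 = seqA.upper()
--     sqm2 = seqB.upper()
--     dic = {}
--     temp = []
--
--
--     while(low <= high):
--         for i in range(len(sqm1)-low + 1):
--             sub_seq = sqm1[i: i+low]
--             if sub_seq not in dic.keys():
--                 dic[sub_seq] = 0
--                 temp.append(sub_seq)
--
--         for i in range(len(sqm2)-low + 1):
--             if sqm2[i: i+low] in temp:
--                 dic[sqm2[i: i+low]] += 1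
--
--         temp = []
--         low += 1
--
--     return sorted(dic.items(), key=lambda x: x[1], reverse = True)
-- ===== SOURCE B (Python) =====
-- def finds_parterns_frequency(seqA, seqB, low, high):
--     a = seqA.upper()
--     b = seqB.upper()
--     result = {}
--     for L in range(low, high + 1):
--         # tabulate every sliding window of seqB at this length
--         freq = {}
--         for i in range(len(b) - L + 1):
--             w = b[i:i+L]
--             freq[w] = freq.get(w, 0) + 1
--         # look up each first-seen seqA substring in the table
--         for i in range(len(a) - L + 1):
--             s = a[i:i+L]
--             if s not in result:
--                 result[s] = freq.get(s, 0)
--     return sorted(result.items(), key=lambda kv: kv[1], reverse=True)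
-- ===== Notes on version B (the rewrite author's own statement) =====
-- stated objective: alternative
-- what changed: Instead of incrementing a filtered key set while scanning seqB (membership test against the per-length temp list inside the seqB loop), B first tabulates a full frequency table of ALL sliding windows of seqB for each length and then assigns each first-seen seqA substring its frequency by a single lookup (default 0), separating tabulation from lookup and removing the list-membership scan.
import Mathlib
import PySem

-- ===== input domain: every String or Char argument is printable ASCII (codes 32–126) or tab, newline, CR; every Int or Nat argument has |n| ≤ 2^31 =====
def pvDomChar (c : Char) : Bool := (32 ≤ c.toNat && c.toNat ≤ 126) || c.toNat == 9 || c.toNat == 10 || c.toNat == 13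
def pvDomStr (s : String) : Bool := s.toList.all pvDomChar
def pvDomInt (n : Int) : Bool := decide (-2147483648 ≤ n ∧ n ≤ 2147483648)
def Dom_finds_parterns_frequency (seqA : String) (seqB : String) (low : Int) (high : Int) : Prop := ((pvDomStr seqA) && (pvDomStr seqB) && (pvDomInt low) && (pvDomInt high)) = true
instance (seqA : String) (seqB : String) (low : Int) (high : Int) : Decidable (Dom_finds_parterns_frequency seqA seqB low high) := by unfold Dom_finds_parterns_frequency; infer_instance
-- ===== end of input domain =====

-- B tabulates a full per-length frequency table of seqB's sliding windows and looks each
-- first-seen seqA substring up in it, instead of A's increment-while-scanning with a list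
-- membership test; alternative decomposition, same results.


-- ===== PORT A =====
-- one `while` iteration: first loop collects fresh substrings of sqm1 (dic[sub]=0, temp.append),
-- second loop does `dic[sqm2[i:i+low]] += 1` when the window is in temp (the key is then always
-- present, so Dict.modify with default 0 is exact there)
def pvAstep (sqm1 sqm2 : List Char) (low : Int) (dic : PySem.Dict (List Char) Int) :
    PySem.Dict (List Char) Int :=
  let pr := (PySem.List.pyRange 0 ((sqm1.length : Int) - low + 1) 1).foldl
      (fun (st : PySem.Dict (List Char) Int × List (List Char)) i =>
        let sub := PySem.List.slice sqm1 (some i) (some (i + low))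
        if st.1.contains sub then st else (st.1.insert sub 0, st.2 ++ [sub]))
      (dic, [])
  (PySem.List.pyRange 0 ((sqm2.length : Int) - low + 1) 1).foldl
      (fun d i =>
        let w := PySem.List.slice sqm2 (some i) (some (i + low))
        if pr.2.contains w then d.modify w 0 (· + 1) else d)
      pr.1

def pvAwhile (sqm1 sqm2 : List Char) (low high : Int) (dic : PySem.Dict (List Char) Int) :
    PySem.Dict (List Char) Int :=
  if low ≤ high then pvAwhile sqm1 sqm2 (low + 1) high (pvAstep sqm1 sqm2 low dic) else dic
termination_by (high + 1 - low).toNat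
decreasing_by omega

def finds_parterns_frequency (seqA : String) (seqB : String) (low : Int) (high : Int) :
    List (String × Int) :=
  let sqm1 := PySem.Chars.upper seqA.toList
  let sqm2 := PySem.Chars.upper seqB.toList
  let dic := pvAwhile sqm1 sqm2 low high PySem.Dict.empty
  (PySem.List.sorted dic.items (fun x => x.2) true).map (fun p => (String.ofList p.1, p.2))

-- ===== PORT B =====
-- one `for L in range(low, high+1)` body: tabulate freq of ALL windows of b, then look up
def pvBstep (a b : List Char) (L : Int) (res : PySem.Dict (List Char) Int) :
    PySem.Dict (List Char) Int :=
  let freq := (PySem.List.pyRange 0 ((b.length : Int) - L + 1) 1).foldl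
      (fun d i =>
        let w := PySem.List.slice b (some i) (some (i + L))
        d.insert w (d.getD w 0 + 1))
      PySem.Dict.empty
  (PySem.List.pyRange 0 ((a.length : Int) - L + 1) 1).foldl
      (fun d i =>
        let s := PySem.List.slice a (some i) (some (i + L))
        if d.contains s then d else d.insert s (freq.getD s 0))
      res

def finds_parterns_frequency_alt (seqA : String) (seqB : String) (low : Int) (high : Int) :
    List (String × Int) :=
  let a := PySem.Chars.upper seqA.toList
  let b := PySem.Chars.upper seqB.toList
  let res := (PySem.List.pyRange low (high + 1) 1).foldl (fun r L => pvBstep a b L r)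
      PySem.Dict.empty
  (PySem.List.sorted res.items (fun kv => kv.2) true).map (fun p => (String.ofList p.1, p.2))

-- ===== PRECONDITION & SPEC =====
def Spec_finds_parterns_frequency (seqA : String) (seqB : String) (low : Int) (high : Int) (out : List (String × Int)) : Prop := out = finds_parterns_frequency_alt seqA seqB low high
instance (seqA : String) (seqB : String) (low : Int) (high : Int) (out : List (String × Int)) : Decidable (Spec_finds_parterns_frequency seqA seqB low high out) := by unfold Spec_finds_parterns_frequency; infer_instance

-- ===== CLAIM (what is proved, stated in full; the proofs are below) =====
def Claim_equal_finds_parterns_frequency : Prop := ∀ (seqA : String) (seqB : String) (low : Int) (high : Int), Dom_finds_parterns_frequency seqA seqB low high → Spec_finds_parterns_frequency seqA seqB low high (finds_parterns_frequency seqA seqB low high)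

-- ===== LEMMAS AND PROOFS =====

-- helper: the fresh (first-occurrence, not-yet-seen) keys of a window list
def pvFresh (seen : List (List Char)) : List (List Char) → List (List Char)
  | [] => []
  | w :: ws => if w ∈ seen then pvFresh seen ws else w :: pvFresh (seen ++ [w]) ws

theorem pvFresh_props (ws : List (List Char)) : ∀ seen,
    (∀ k ∈ pvFresh seen ws, k ∉ seen) ∧ (pvFresh seen ws).Nodup := by
  induction ws with
  | nil => intro seen; simp [pvFresh]
  | cons w ws ih =>
    intro seen
    by_cases h : w ∈ seen
    · simpa [pvFresh, h] using ih seen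
    · have := ih (seen ++ [w])
      simp only [pvFresh, if_neg h, List.mem_append, List.mem_singleton] at this ⊢
      constructor
      · intro k hk
        rcases List.mem_cons.1 hk with rfl | hk
        · exact h
        · exact fun hs => (this.1 k hk) (Or.inl hs)
      · refine List.nodup_cons.2 ⟨fun hw => (this.1 w hw) (Or.inr rfl), this.2⟩

theorem pvA1 (ws : List (List Char)) : ∀ (d : PySem.Dict (List Char) Int) (t : List (List Char)),
    d.keys.Nodup →
    ws.foldl (fun st w => if st.1.contains w then st else (st.1.insert w 0, st.2 ++ [w])) (d, t)
      = ((pvFresh d.keys ws).foldl (fun d k => d.insert k 0) d, t ++ pvFresh d.keys ws) := by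
  induction ws with
  | nil => intro d t _; simp [pvFresh]
  | cons w ws ih =>
    intro d t hn
    by_cases h : d.contains w
    · have hm : w ∈ d.keys := (PySem.Dict.contains_iff_mem_keys d w).1 h
      simp only [List.foldl_cons, if_pos h, pvFresh, if_pos hm]
      exact ih d t hn
    · have hm : w ∉ d.keys := fun hw => h ((PySem.Dict.contains_iff_mem_keys d w).2 hw)
      have hk : (d.insert w 0).keys = d.keys ++ [w] :=
        PySem.Dict.keys_insert_of_not_contains d _ (by simpa using h)
      have hn' : (d.insert w 0).keys.Nodup := by
        rw [hk]
        exact hn.append (List.nodup_singleton w) (by simpa using hm)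
      simp only [List.foldl_cons, if_neg h, pvFresh, if_neg hm]
      rw [ih (d.insert w 0) (t ++ [w]) hn', hk]
      simp [List.append_assoc]

theorem pvB1 (freq : PySem.Dict (List Char) Int) (ws : List (List Char)) :
    ∀ (d : PySem.Dict (List Char) Int),
    ws.foldl (fun d s => if d.contains s then d else d.insert s (freq.getD s 0)) d
      = (pvFresh d.keys ws).foldl (fun d k => d.insert k (freq.getD k 0)) d := by
  induction ws with
  | nil => intro d; simp [pvFresh]
  | cons w ws ih =>
    intro d
    by_cases h : d.contains w
    · have hm : w ∈ d.keys := (PySem.Dict.contains_iff_mem_keys d w).1 h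
      simp only [List.foldl_cons, if_pos h, pvFresh, if_pos hm]
      exact ih d
    · have hm : w ∉ d.keys := fun hw => h ((PySem.Dict.contains_iff_mem_keys d w).2 hw)
      have hk : (d.insert w (freq.getD w 0)).keys = d.keys ++ [w] :=
        PySem.Dict.keys_insert_of_not_contains d _ (by simpa using h)
      simp only [List.foldl_cons, if_neg h, pvFresh, if_neg hm]
      rw [ih, hk]

theorem pvSetUpdate_self (s : PySem.Set (List Char)) (l : List (List Char))
    (h : ∀ x ∈ l, x ∈ s) : PySem.Set.update s l = s := by
  rw [PySem.Set.update_eq_append_filter]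
  have : (PySem.Set.ofList l).filter (fun y => !(PySem.Set.contains s y)) = [] := by
    rw [List.filter_eq_nil_iff]
    intro y hy
    simp only [PySem.Set.mem_ofList] at hy
    simp [PySem.Set.contains, h y hy]
  rw [this, List.append_nil]

theorem pvModifyItems (l : List (List Char)) (D : PySem.Dict (List Char) Int)
    (hn : D.keys.Nodup) (hc : ∀ w ∈ l, w ∈ D.keys) :
    (l.foldl (fun d w => d.modify w 0 (· + 1)) D).items
      = D.items.map (fun p => (p.1, p.2 + (l.count p.1 : Int))) := by
  have hkeys : (l.foldl (fun d w => d.modify w 0 (· + 1)) D).keys = D.keys := by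
    rw [PySem.Dict.keys_foldl_modify l 0 (fun _ _ v => v + 1) D]
    exact pvSetUpdate_self _ _ hc
  have hn' : (l.foldl (fun d w => d.modify w 0 (· + 1)) D).keys.Nodup := hkeys ▸ hn
  rw [PySem.Dict.items_eq_map_keys _ hn' 0, hkeys, PySem.Dict.items_eq_map_keys D hn 0,
    List.map_map]
  apply List.map_congr_left
  intro k hk
  simp [PySem.Dict.getD_foldl_modify_add_one]

theorem pvStepGen (ws vs : List (List Char)) (d : PySem.Dict (List Char) Int)
    (hn : d.keys.Nodup) :
    (vs.foldl
       (fun dd w =>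
         if ((ws.foldl (fun st w => if st.1.contains w then st else (st.1.insert w 0, st.2 ++ [w]))
               (d, ([] : List (List Char)))).2).contains w
         then dd.modify w 0 (· + 1) else dd)
       (ws.foldl (fun st w => if st.1.contains w then st else (st.1.insert w 0, st.2 ++ [w]))
         (d, ([] : List (List Char)))).1)
    = ws.foldl
        (fun dd s =>
          if dd.contains s then dd
          else dd.insert s ((vs.foldl (fun f w => f.insert w (f.getD w 0 + 1))
            PySem.Dict.empty).getD s 0))
        d := by
  have h1 := pvA1 ws d [] hn
  set ks := pvFresh d.keys ws with hks
  have hfr := pvFresh_props ws d.keys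
  have hfresh : ∀ k ∈ ks, d.contains k = false := by
    intro k hk
    have := hfr.1 k hk
    simpa using fun hc => this ((PySem.Dict.contains_iff_mem_keys d k).1 hc)
  have hD1 := PySem.Dict.items_foldl_insert_fresh ks (fun k => k) (fun _ => (0 : Int)) d
      hfresh (by simpa using hfr.2)
  set D1 := ks.foldl (fun d k => d.insert k 0) d with hD1def
  have hkeys1 : D1.keys = d.keys ++ ks := by
    simp only [PySem.Dict.keys, hD1]
    simp [Function.comp_def]
  have hn1 : D1.keys.Nodup := by
    rw [hkeys1]
    exact hn.append hfr.2 (fun a ha hb => hfr.1 a hb ha)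
  rw [h1]
  simp only [List.nil_append]
  -- A's second loop: fold with `if w in temp` = fold over the filtered windows
  have hfold : (vs.foldl (fun dd w => if ks.contains w then dd.modify w 0 (· + 1) else dd) D1)
      = ((vs.filter (fun w => ks.contains w)).foldl (fun dd w => dd.modify w 0 (· + 1)) D1) :=
    (List.foldl_filter).symm
  refine hfold.trans ?_
  -- B's fold
  rw [pvB1, ← hks]
  apply PySem.Dict.ext
  rw [pvModifyItems _ D1 hn1 (by
    intro w hw
    rw [hkeys1]
    exact List.mem_append_right _ (by simpa using (List.mem_filter.1 hw).2))]
  rw [hD1]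
  rw [PySem.Dict.items_foldl_insert_fresh ks (fun k => k) _ d hfresh (by simpa using hfr.2)]
  rw [PySem.Dict.foldl_insert_getD_add_one_eq_counter]
  rw [List.map_append, List.map_map]
  congr 1
  · conv_rhs => rw [← List.map_id d.items]
    apply List.map_congr_left
    intro p hp
    have hpk : p.1 ∈ d.keys := PySem.Dict.mem_keys_of_mem_items d hp
    have hnotks : p.1 ∉ ks := fun hk => hfr.1 p.1 hk hpk
    have h0 : List.count p.1 (List.filter (fun w => decide (w ∈ ks)) vs) = 0 := by
      rw [List.count_eq_zero]
      intro hmem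
      exact hnotks (by simpa using (List.mem_filter.1 hmem).2)
    simp [h0]
  · apply List.map_congr_left
    intro k hk
    have h2 : List.count k (List.filter (fun w => decide (w ∈ ks)) vs) = List.count k vs :=
      List.count_filter (by simpa using hk)
    simp [PySem.Dict.getD_counter, h2]

theorem pvStep_eq (a b : List Char) (L : Int) (d : PySem.Dict (List Char) Int)
    (hn : d.keys.Nodup) : pvAstep a b L d = pvBstep a b L d := by
  have h := pvStepGen
      ((PySem.List.pyRange 0 ((a.length : Int) - L + 1) 1).map
        (fun i => PySem.List.slice a (some i) (some (i + L))))
      ((PySem.List.pyRange 0 ((b.length : Int) - L + 1) 1).map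
        (fun i => PySem.List.slice b (some i) (some (i + L)))) d hn
  simp only [List.foldl_map] at h
  exact h

theorem pvStepNodupGen (ws : List (List Char)) (freq : PySem.Dict (List Char) Int)
    (d : PySem.Dict (List Char) Int) (hn : d.keys.Nodup) :
    (ws.foldl (fun dd s => if dd.contains s then dd else dd.insert s (freq.getD s 0)) d).keys.Nodup := by
  rw [pvB1]
  rw [PySem.Dict.keys_foldl_insert (pvFresh d.keys ws) (fun dd k => freq.getD k 0) d]
  exact PySem.Set.nodup_update _ _ hn

theorem pvStep_nodup (a b : List Char) (L : Int) (d : PySem.Dict (List Char) Int)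
    (hn : d.keys.Nodup) : (pvBstep a b L d).keys.Nodup := by
  have h := pvStepNodupGen
      ((PySem.List.pyRange 0 ((a.length : Int) - L + 1) 1).map
        (fun i => PySem.List.slice a (some i) (some (i + L))))
      ((PySem.List.pyRange 0 ((b.length : Int) - L + 1) 1).foldl
        (fun f i => f.insert (PySem.List.slice b (some i) (some (i + L)))
          (f.getD (PySem.List.slice b (some i) (some (i + L))) 0 + 1)) PySem.Dict.empty)
      d hn
  simp only [List.foldl_map] at h
  exact h

theorem pvLoop_eq (a b : List Char) (low high : Int) (d : PySem.Dict (List Char) Int)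
    (hn : d.keys.Nodup) :
    pvAwhile a b low high d =
      (PySem.List.pyRange low (high + 1) 1).foldl (fun r L => pvBstep a b L r) d := by
  rw [pvAwhile]
  split_ifs with h
  · rw [PySem.List.pyRange_one_cons (by omega : low < high + 1), List.foldl_cons,
      pvStep_eq a b low d hn]
    exact pvLoop_eq a b (low + 1) high _ (pvStep_nodup a b low d hn)
  · rw [PySem.List.pyRange_one_eq_nil (by omega : high + 1 ≤ low), List.foldl_nil]
termination_by (high + 1 - low).toNat
decreasing_by omega

-- ===== VERDICT (by name: the statement is the Claim_ definition above) =====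
theorem finds_parterns_frequency_spec : Claim_equal_finds_parterns_frequency := by
  intro seqA seqB low high _
  unfold Spec_finds_parterns_frequency finds_parterns_frequency finds_parterns_frequency_alt
  simp only []
  rw [pvLoop_eq _ _ _ _ _ (by simp [PySem.Dict.keys_empty])]
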